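-- pv_equiv track=rewrite | github.com/ls1intum/LEARN-Hub | dataset/seed.py | find_activities_by_name
-- ===== SOURCE A (Python) =====
-- def find_activities_by_name(activities: list[dict], names: list[str]) -> tuple[list[dict], list[str]]:
--     """Find activities by exact name, case-insensitively. Returns (matches, missing names)."""
--     activities_by_name: dict[str, list[dict]] = {}
--     for activity in activities:
--         name = activity.get("name", "")
--         if name:
--             activities_by_name.setdefault(name.casefold(), []).append(activity)
--
--     matches = []
--     missing = []
--     for name in names:
--         found = activities_by_name.get(name.casefold(), [])
--         if found:
--             matches.extend(found)
--         else:
--             missing.append(name)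
--     return matches, missing
-- ===== SOURCE B (Python) =====
-- def find_activities_by_name(activities: list[dict], names: list[str]) -> tuple[list[dict], list[str]]:
--     """Find activities by exact name, case-insensitively. Returns (matches, missing names)."""
--     matches = []
--     missing = []
--     for name in names:
--         key = name.casefold()
--         found = [a for a in activities
--                  if a.get("name", "") and a.get("name", "").casefold() == key]
--         if found:
--             matches.extend(found)
--         else:
--             missing.append(name)
--     return matches, missing
-- ===== Notes on version B (the rewrite author's own statement) =====
-- stated objective: simpler
-- what changed: Drops the pre-built casefolded-name index dict entirely: for each requested name B does a direct filter pass over the activities list, collecting the matching activities (or recording the name as missing).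
import Mathlib
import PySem

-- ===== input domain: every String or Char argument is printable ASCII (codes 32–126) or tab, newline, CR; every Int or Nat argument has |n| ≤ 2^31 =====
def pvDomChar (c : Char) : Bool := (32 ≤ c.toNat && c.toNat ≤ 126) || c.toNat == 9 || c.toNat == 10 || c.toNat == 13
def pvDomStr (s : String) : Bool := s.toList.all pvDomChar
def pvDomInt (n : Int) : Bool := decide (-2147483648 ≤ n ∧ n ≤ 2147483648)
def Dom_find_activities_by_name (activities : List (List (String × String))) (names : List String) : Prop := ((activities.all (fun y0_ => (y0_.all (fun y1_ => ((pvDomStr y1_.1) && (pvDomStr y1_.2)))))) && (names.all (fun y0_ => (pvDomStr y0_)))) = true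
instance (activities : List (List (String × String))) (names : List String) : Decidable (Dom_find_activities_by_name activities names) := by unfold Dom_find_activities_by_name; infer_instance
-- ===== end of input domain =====

-- B drops A's pre-built casefolded-name index dict: per requested name it filters the
-- activities list directly (objective: simpler). casefold is ported as lower, exact on
-- the ASCII domain; dict lookup activity.get("name","") is first-match List.lookup.

-- ===== PORT A =====
def find_activities_by_name (activities : List (List (String × String))) (names : List String) : (List (List (String × String))) × List String :=
  -- activities_by_name: dict[str, list[dict]] built by setdefault(...,[]).append(activity)
  let abn : PySem.Dict String (List (List (String × String))) :=
    activities.foldl (fun d activity =>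
      let name := (activity.lookup "name").getD ""
      if name ≠ "" then d.modify (PySem.Str.lower name) [] (· ++ [activity]) else d)
      PySem.Dict.empty
  names.foldl (fun acc name =>
      let found := abn.getD (PySem.Str.lower name) []
      if found ≠ [] then (acc.1 ++ found, acc.2) else (acc.1, acc.2 ++ [name]))
    ([], [])

-- ===== PORT B =====
def find_activities_by_name_alt (activities : List (List (String × String))) (names : List String) : (List (List (String × String))) × List String :=
  names.foldl (fun acc name =>
      let key := PySem.Str.lower name
      let found := activities.filter (fun a =>
        let an := (a.lookup "name").getD ""
        (an != "") && (PySem.Str.lower an == key))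
      if found ≠ [] then (acc.1 ++ found, acc.2) else (acc.1, acc.2 ++ [name]))
    ([], [])

-- ===== PRECONDITION & SPEC =====
def Spec_find_activities_by_name (activities : List (List (String × String))) (names : List String) (out : (List (List (String × String))) × List String) : Prop := out = find_activities_by_name_alt activities names
instance (activities : List (List (String × String))) (names : List String) (out : (List (List (String × String))) × List String) : Decidable (Spec_find_activities_by_name activities names out) := by unfold Spec_find_activities_by_name; infer_instance

-- ===== CLAIM (what is proved, stated in full; the proofs are below) =====
def Claim_equal_find_activities_by_name : Prop := ∀ (activities : List (List (String × String))) (names : List String), Dom_find_activities_by_name activities names → Spec_find_activities_by_name activities names (find_activities_by_name activities names)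

-- ===== LEMMAS AND PROOFS =====

-- A's grouping dict, looked up at key c, is exactly B's filter of the activities list.
lemma pv_groupD (l : List (List (String × String)))
    (d : PySem.Dict String (List (List (String × String)))) (c : String) :
    (l.foldl (fun d a =>
        if (a.lookup "name").getD "" = "" then d
        else d.modify (PySem.Str.lower ((a.lookup "name").getD "")) [] (· ++ [a])) d).getD c []
      = d.getD c [] ++ l.filter (fun a =>
          ((a.lookup "name").getD "" != "") && (PySem.Str.lower ((a.lookup "name").getD "") == c)) := by
  induction l generalizing d with
  | nil => simp
  | cons a l ih =>
    simp only [List.foldl_cons, List.filter_cons]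
    by_cases h1 : (a.lookup "name").getD "" = ""
    · rw [if_pos h1, ih]
      simp [h1]
    · rw [if_neg h1, ih, PySem.Dict.getD_modify]
      by_cases h2 : c = PySem.Str.lower ((a.lookup "name").getD "")
      · simp [h1, h2]
      · have h2' : (PySem.Str.lower ((a.lookup "name").getD "") == c) = false := by
          simp; exact fun h => h2 h.symm
        simp [h2, h2']

-- ===== VERDICT (by name: the statement is the Claim_ definition above) =====
theorem find_activities_by_name_spec : Claim_equal_find_activities_by_name := by
  intro activities names _
  unfold Spec_find_activities_by_name find_activities_by_name find_activities_by_name_alt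
  dsimp only
  refine PySem.List.foldl_congr_mem _ _ _ _ ?_
  intro acc name _
  have h := pv_groupD activities PySem.Dict.empty (PySem.Str.lower name)
  simp only [PySem.Dict.getD_empty, List.nil_append] at h
  simp [h]
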